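-- pv_equiv track=rewrite | github.com/A3ex1984/hello_world | needed_classrooms.py | find_nr_rooms
-- ===== SOURCE A (Python) =====
-- def find_nr_rooms(intervals):
--     max_rooms = 0
--     for v in intervals:
--         rooms=1
--         for u in intervals:
--             if u[0]>v[0] and u[0]<v[1]:
--                 rooms += 1
--         if rooms > max_rooms: max_rooms = rooms
--     return max_rooms
-- ===== SOURCE B (Python) =====
-- def _bisect_left(a, x):
--     lo, hi = 0, len(a)
--     while lo < hi:
--         mid = (lo + hi) // 2
--         if a[mid] < x:
--             lo = mid + 1
--         else:
--             hi = mid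
--     return lo
--
-- def _bisect_right(a, x):
--     lo, hi = 0, len(a)
--     while lo < hi:
--         mid = (lo + hi) // 2
--         if a[mid] <= x:
--             lo = mid + 1
--         else:
--             hi = mid
--     return lo
--
-- def find_nr_rooms(intervals):
--     starts = sorted(v[0] for v in intervals)
--     best = 0
--     for v in intervals:
--         inside = _bisect_left(starts, v[1]) - _bisect_right(starts, v[0])
--         rooms = 1 + (inside if inside > 0 else 0)
--         if rooms > best:
--             best = rooms
--     return best
-- ===== Notes on version B (the rewrite author's own statement) =====
-- stated objective: faster
-- what changed: Replaces the quadratic nested scan (for each interval, rescan all intervals counting starts strictly inside it) by sorting the starts once and answering each per-interval count with two hand-written binary searches.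
import Mathlib
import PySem

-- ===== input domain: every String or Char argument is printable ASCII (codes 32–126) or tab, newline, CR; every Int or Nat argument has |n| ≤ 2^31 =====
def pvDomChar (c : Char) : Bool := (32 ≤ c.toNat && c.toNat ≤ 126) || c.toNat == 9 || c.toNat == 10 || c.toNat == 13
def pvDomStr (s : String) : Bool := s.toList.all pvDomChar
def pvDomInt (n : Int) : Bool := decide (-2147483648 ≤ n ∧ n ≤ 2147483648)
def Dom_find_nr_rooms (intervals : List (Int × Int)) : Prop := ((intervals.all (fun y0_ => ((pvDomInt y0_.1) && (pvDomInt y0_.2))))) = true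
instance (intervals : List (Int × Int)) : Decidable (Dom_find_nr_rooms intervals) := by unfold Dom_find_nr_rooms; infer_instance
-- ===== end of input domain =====

-- B sorts the starts once and uses two hand-written binary searches per interval instead of A's
-- quadratic nested rescans (objective: faster).

-- ===== PORT A =====
def find_nr_rooms (intervals : List (Int × Int)) : Int :=
  intervals.foldl (fun max_rooms v =>
    let rooms : Int :=
      intervals.foldl (fun rooms u => if u.1 > v.1 ∧ u.1 < v.2 then rooms + 1 else rooms) 1
    if rooms > max_rooms then rooms else max_rooms) 0

-- ===== PORT B =====
-- hand-written binary searches, transcribing Source B's while-loops (a.getD mid 0: mid is always in range)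
def pvBisectLeftLoop (a : List Int) (x : Int) (lo hi : Nat) : Nat :=
  if _h : lo < hi then
    let mid := (lo + hi) / 2
    if a.getD mid 0 < x then pvBisectLeftLoop a x (mid + 1) hi
    else pvBisectLeftLoop a x lo mid
  else lo
termination_by hi - lo
decreasing_by all_goals omega

def pvBisectRightLoop (a : List Int) (x : Int) (lo hi : Nat) : Nat :=
  if _h : lo < hi then
    let mid := (lo + hi) / 2
    if a.getD mid 0 ≤ x then pvBisectRightLoop a x (mid + 1) hi
    else pvBisectRightLoop a x lo mid
  else lo
termination_by hi - lo
decreasing_by all_goals omega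

def find_nr_rooms_alt (intervals : List (Int × Int)) : Int :=
  let starts := PySem.List.sorted (intervals.map Prod.fst) (fun x => x) false
  intervals.foldl (fun best v =>
    let inside : Int :=
      (pvBisectLeftLoop starts v.2 0 starts.length : Int)
        - (pvBisectRightLoop starts v.1 0 starts.length : Int)
    let rooms : Int := 1 + (if inside > 0 then inside else 0)
    if rooms > best then rooms else best) 0

-- ===== PRECONDITION & SPEC =====
def Spec_find_nr_rooms (intervals : List (Int × Int)) (out : Int) : Prop := out = find_nr_rooms_alt intervals
instance (intervals : List (Int × Int)) (out : Int) : Decidable (Spec_find_nr_rooms intervals out) := by unfold Spec_find_nr_rooms; infer_instance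

-- ===== CLAIM (what is proved, stated in full; the proofs are below) =====
def Claim_equal_find_nr_rooms : Prop := ∀ (intervals : List (Int × Int)), Dom_find_nr_rooms intervals → Spec_find_nr_rooms intervals (find_nr_rooms intervals)

-- ===== LEMMAS AND PROOFS =====

-- In a sorted list, a downward-closed predicate holds exactly on the prefix of length countP.
lemma countP_prefix_iff (s : List Int) (p : Int → Bool)
    (hdc : ∀ a b : Int, a ≤ b → p b = true → p a = true)
    (hs : s.Pairwise (· ≤ ·)) :
    ∀ j (hj : j < s.length), (j < s.countP p ↔ p s[j] = true) := by
  induction s with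
  | nil => intro j hj; simp at hj
  | cons a t ih =>
    rcases List.pairwise_cons.mp hs with ⟨hle, ht⟩
    intro j hj
    by_cases hpa : p a = true
    · cases j with
      | zero => simpa [List.countP_cons, hpa]
      | succ j =>
        have := ih ht j (by simpa using hj)
        simpa [List.countP_cons, hpa, Nat.succ_lt_succ_iff] using this
    · have hz : (a :: t).countP p = 0 := by
        apply List.countP_eq_zero.mpr
        intro y hy
        rcases List.mem_cons.mp hy with rfl | hyt
        · simpa using hpa
        · intro hpy; exact hpa (hdc a y (hle y hyt) hpy)
      rw [hz]
      constructor
      · omega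
      · intro hpj
        exfalso
        cases j with
        | zero => exact hpa (by simpa using hpj)
        | succ j =>
          have hjt : j < t.length := by simpa using hj
          have hpj' : p (t[j]'hjt) = true := by simpa using hpj
          exact hpa (hdc a _ (hle _ (List.getElem_mem hjt)) hpj')

-- the binary-search loop returns countP p s when the invariant lo ≤ countP ≤ hi ≤ |s| holds
lemma bisect_loop_eq (s : List Int) (x : Int) (p : Int → Bool)
    (hdc : ∀ a b : Int, a ≤ b → p b = true → p a = true)
    (hs : s.Pairwise (· ≤ ·))
    (loop : List Int → Int → Nat → Nat → Nat)
    (hloop : ∀ lo hi, loop s x lo hi =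
      if lo < hi then
        (if p (s.getD ((lo + hi) / 2) 0) = true then loop s x ((lo + hi) / 2 + 1) hi
         else loop s x lo ((lo + hi) / 2))
      else lo) :
    ∀ n lo hi, hi - lo ≤ n → lo ≤ s.countP p → s.countP p ≤ hi → hi ≤ s.length →
      loop s x lo hi = s.countP p := by
  intro n
  induction n with
  | zero =>
    intro lo hi hn h1 h2 h3
    rw [hloop]
    have : ¬ lo < hi := by omega
    simp [this]; omega
  | succ n ih =>
    intro lo hi hn h1 h2 h3
    rw [hloop]
    by_cases hlt : lo < hi
    · have hmid1 : lo ≤ (lo + hi) / 2 := by omega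
      have hmid2 : (lo + hi) / 2 < hi := by omega
      have hm : (lo + hi) / 2 < s.length := by omega
      have hgd : s.getD ((lo + hi) / 2) 0 = s[(lo + hi) / 2] := List.getD_eq_getElem s 0 hm
      have hchar := countP_prefix_iff s p hdc hs ((lo + hi) / 2) hm
      by_cases hp : p (s.getD ((lo + hi) / 2) 0) = true
      · have : (lo + hi) / 2 < s.countP p := hchar.mpr (by rwa [hgd] at hp)
        simp only [hlt, if_true, hp, if_true]
        exact ih _ _ (by omega) (by omega) h2 h3
      · have : ¬ (lo + hi) / 2 < s.countP p := fun hc => hp (by rw [hgd]; exact hchar.mp hc)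
        simp only [hlt, if_true, hp]
        exact ih lo _ (by omega) h1 (by omega) (by omega)
    · simp [hlt]; omega

lemma bisectLeft_eq_countP (s : List Int) (x : Int) (hs : s.Pairwise (· ≤ ·)) :
    pvBisectLeftLoop s x 0 s.length = s.countP (fun y => decide (y < x)) := by
  have hdc : ∀ a b : Int, a ≤ b → decide (b < x) = true → decide (a < x) = true := by
    intro a b hab h; simp at h ⊢; omega
  exact bisect_loop_eq s x _ hdc hs
    pvBisectLeftLoop
    (fun lo hi => by rw [pvBisectLeftLoop.eq_def]; split_ifs with h1 h2 <;> simp_all)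
    s.length 0 s.length (by omega)
    (by simp [List.countP_le_length])
    (by simp [List.countP_le_length]) (le_refl _)

lemma bisectRight_eq_countP (s : List Int) (x : Int) (hs : s.Pairwise (· ≤ ·)) :
    pvBisectRightLoop s x 0 s.length = s.countP (fun y => decide (y ≤ x)) := by
  have hdc : ∀ a b : Int, a ≤ b → decide (b ≤ x) = true → decide (a ≤ x) = true := by
    intro a b hab h; simp at h ⊢; omega
  exact bisect_loop_eq s x _ hdc hs
    pvBisectRightLoop
    (fun lo hi => by rw [pvBisectRightLoop.eq_def]; split_ifs with h1 h2 <;> simp_all)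
    s.length 0 s.length (by omega)
    (by simp [List.countP_le_length])
    (by simp [List.countP_le_length]) (le_refl _)

-- pointwise counting identity on any list of starts
lemma count_between (l : List Int) (a b : Int) :
    (1 : Int) + (if (0:Int) < (l.countP (fun y => decide (y < b)) : Int)
                      - (l.countP (fun y => decide (y ≤ a)) : Int)
                 then (l.countP (fun y => decide (y < b)) : Int)
                      - (l.countP (fun y => decide (y ≤ a)) : Int) else 0)
    = 1 + (l.countP (fun y => decide (a < y ∧ y < b)) : Int) := by
  by_cases hab : a < b
  · have hsum : l.countP (fun y => decide (y < b))
        = l.countP (fun y => decide (y ≤ a)) + l.countP (fun y => decide (a < y ∧ y < b)) := by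
      induction l with
      | nil => simp
      | cons z t ih =>
        simp only [List.countP_cons, ih]
        by_cases h1 : z ≤ a <;> by_cases h2 : z < b <;> by_cases h3 : a < z <;>
          simp [h1, h2, h3] <;> omega
    rw [hsum]
    push_cast
    split_ifs <;> omega
  · have h0 : l.countP (fun y => decide (a < y ∧ y < b)) = 0 :=
      List.countP_eq_zero.mpr (by intro y _; simp; omega)
    have hle : l.countP (fun y => decide (y < b)) ≤ l.countP (fun y => decide (y ≤ a)) := by
      apply List.countP_mono_left
      intro y _ h; simp at h ⊢; omega
    rw [h0]
    split_ifs with h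
    · exfalso; push_cast at h; omega
    · simp

-- ===== VERDICT (by name: the statement is the Claim_ definition above) =====
theorem find_nr_rooms_spec : Claim_equal_find_nr_rooms := by
  intro intervals _
  unfold Spec_find_nr_rooms find_nr_rooms find_nr_rooms_alt
  apply PySem.List.foldl_congr_mem
  intro acc v _
  have hperm := PySem.List.sorted_perm (intervals.map Prod.fst) (fun x => x) false
  have hsorted : (PySem.List.sorted (intervals.map Prod.fst) (fun x => x) false).Pairwise (· ≤ ·) := by
    simpa using PySem.List.sorted_pairwise (intervals.map Prod.fst) (fun x => x)
  set starts := PySem.List.sorted (intervals.map Prod.fst) (fun x => x) false with hst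
  -- A's inner loop is 1 + a count over intervals
  have hA : intervals.foldl (fun rooms u => if u.1 > v.1 ∧ u.1 < v.2 then rooms + 1 else rooms) (1:Int)
      = 1 + (intervals.countP (fun u => decide (u.1 > v.1 ∧ u.1 < v.2)) : Int) := by
    simpa using PySem.List.foldl_ite_add_one (fun u : Int × Int => u.1 > v.1 ∧ u.1 < v.2) intervals 1
  -- counts over intervals' firsts = counts over the sorted starts
  have hcnt : ∀ q : Int → Bool,
      starts.countP q = intervals.countP (fun u => q u.1) := by
    intro q
    rw [hperm.countP_eq, List.countP_map]
    rfl
  rw [hA, bisectLeft_eq_countP starts v.2 hsorted, bisectRight_eq_countP starts v.1 hsorted]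
  have hmid := hcnt (fun y => decide (v.1 < y ∧ y < v.2))
  simp only [gt_iff_lt, count_between starts v.1 v.2, hmid]
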